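-- pv_equiv track=rewrite | github.com/k1monfared/notes | blog/files/20251201/verify_probabilities.py | count_pairings_with_both_pairs_sum
-- ===== SOURCE A (Python) =====
-- def count_pairings_with_both_pairs_sum(dice, target_sum):
--     """Count how many of the 3 pairings have BOTH pairs with target_sum"""
--     d1, d2, d3, d4 = dice
--
--     # Three ways to pair 4 dice
--     all_pairings = [
--         [(d1, d2), (d3, d4)],
--         [(d1, d3), (d2, d4)],
--         [(d1, d4), (d2, d3)]
--     ]
--
--     count = 0
--     for pairing in all_pairings:
--         if all(sum(pair) == target_sum for pair in pairing):
--             count += 1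
--     return count
-- ===== SOURCE B (Python) =====
-- def count_pairings_with_both_pairs_sum(dice, target_sum):
--     """Count how many of the 3 pairings have BOTH pairs with target_sum"""
--     d1, d2, d3, d4 = dice
--     if d1 + d2 + d3 + d4 != 2 * target_sum:
--         return 0
--     return sum(1 for x in (d2, d3, d4) if d1 + x == target_sum)
-- ===== Notes on version B (the rewrite author's own statement) =====
-- stated objective: simpler
-- what changed: Replaces the enumeration of all three pairings with the all(...) check by an arithmetic shortcut: if the total is not 2*target_sum return 0, otherwise count which of d2,d3,d4 pairs with d1 to target_sum (the other pair is then forced).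
import Mathlib
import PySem

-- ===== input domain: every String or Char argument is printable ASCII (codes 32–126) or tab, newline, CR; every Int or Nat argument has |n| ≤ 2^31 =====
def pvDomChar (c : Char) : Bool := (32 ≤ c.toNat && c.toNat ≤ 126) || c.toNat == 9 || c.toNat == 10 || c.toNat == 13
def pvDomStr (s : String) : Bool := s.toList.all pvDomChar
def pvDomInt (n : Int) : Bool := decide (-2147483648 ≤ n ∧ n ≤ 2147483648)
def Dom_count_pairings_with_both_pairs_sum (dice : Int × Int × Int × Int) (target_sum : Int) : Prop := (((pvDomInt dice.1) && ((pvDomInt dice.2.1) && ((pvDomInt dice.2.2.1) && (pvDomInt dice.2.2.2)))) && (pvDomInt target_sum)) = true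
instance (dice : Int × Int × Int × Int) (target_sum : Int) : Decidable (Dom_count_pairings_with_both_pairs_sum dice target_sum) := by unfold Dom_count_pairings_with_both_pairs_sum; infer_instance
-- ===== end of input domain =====

-- ===== PORT A =====
-- header: B replaces the three-pairing enumeration by a total==2*target_sum check plus a count over d2,d3,d4 (simpler).
def count_pairings_with_both_pairs_sum (dice : Int × Int × Int × Int) (target_sum : Int) : Int :=
  match dice with
  | (d1, d2, d3, d4) =>
    let all_pairings : List (List (Int × Int)) :=
      [[(d1, d2), (d3, d4)], [(d1, d3), (d2, d4)], [(d1, d4), (d2, d3)]]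
    all_pairings.foldl
      (fun count pairing =>
        if pairing.all (fun pair => pair.1 + pair.2 == target_sum) then count + 1 else count)
      0

-- ===== PORT B =====
def count_pairings_with_both_pairs_sum_alt (dice : Int × Int × Int × Int) (target_sum : Int) : Int :=
  match dice with
  | (d1, d2, d3, d4) =>
    if d1 + d2 + d3 + d4 ≠ 2 * target_sum then 0
    else ([d2, d3, d4].foldl (fun acc x => if d1 + x == target_sum then acc + 1 else acc) (0 : Int))

-- ===== PRECONDITION & SPEC =====
def Spec_count_pairings_with_both_pairs_sum (dice : Int × Int × Int × Int) (target_sum : Int) (out : Int) : Prop := out = count_pairings_with_both_pairs_sum_alt dice target_sum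
instance (dice : Int × Int × Int × Int) (target_sum : Int) (out : Int) : Decidable (Spec_count_pairings_with_both_pairs_sum dice target_sum out) := by unfold Spec_count_pairings_with_both_pairs_sum; infer_instance

-- ===== CLAIM (what is proved, stated in full; the proofs are below) =====
def Claim_equal_count_pairings_with_both_pairs_sum : Prop := ∀ (dice : Int × Int × Int × Int) (target_sum : Int), Dom_count_pairings_with_both_pairs_sum dice target_sum → Spec_count_pairings_with_both_pairs_sum dice target_sum (count_pairings_with_both_pairs_sum dice target_sum)

-- ===== LEMMAS AND PROOFS =====

-- ===== VERDICT (by name: the statement is the Claim_ definition above) =====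
theorem count_pairings_with_both_pairs_sum_spec : Claim_equal_count_pairings_with_both_pairs_sum := by
  intro dice target_sum _
  obtain ⟨d1, d2, d3, d4⟩ := dice
  unfold Spec_count_pairings_with_both_pairs_sum
  simp only [count_pairings_with_both_pairs_sum, count_pairings_with_both_pairs_sum_alt,
    List.foldl, List.all, Bool.and_eq_true, beq_iff_eq, Bool.and_true, ne_eq]
  split_ifs <;> simp_all <;> omega
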